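-- pv_equiv track=rewrite | github.com/dvorobej/Data-Engineering | task2/data_preprocessor.py | get_filtered_genres
-- ===== SOURCE A (Python) =====
-- def get_filtered_genres(film_genres, desired_genres=None):
--     """
--     Get film genres satisfies desired genres.
--
--         Params:
--             film_genres (list): movie's genres
--             desired_genres (list): wanted genres
--
--         Return value:
--              filtered_genres (list): genres in the movie satisfing desired genres
--     """
--     filtered_genres = []
--
--     if desired_genres is None:
--         filtered_genres = None
--
--     else:
--         for genre in desired_genres:
--             if (genre in film_genres) and (genre not in filtered_genres):
--                 filtered_genres.append(genre)
--
--     return filtered_genres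
-- ===== SOURCE B (Python) =====
-- def get_filtered_genres(film_genres, desired_genres=None):
--     if desired_genres is None:
--         return None
--     filtered_genres = []
--     rest = list(desired_genres)
--     while rest:
--         head = rest[0]
--         if head in film_genres:
--             filtered_genres.append(head)
--         rest = [g for g in rest[1:] if g != head]
--     return filtered_genres
-- ===== Notes on version B (the rewrite author's own statement) =====
-- stated objective: alternative
-- what changed: Replaces A's seen-check against the growing output list with a shrinking-worklist nub: each step takes the head and erases all its later duplicates from the worklist, so duplicates never reach the output and no membership test on the output exists.
import Mathlib
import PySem

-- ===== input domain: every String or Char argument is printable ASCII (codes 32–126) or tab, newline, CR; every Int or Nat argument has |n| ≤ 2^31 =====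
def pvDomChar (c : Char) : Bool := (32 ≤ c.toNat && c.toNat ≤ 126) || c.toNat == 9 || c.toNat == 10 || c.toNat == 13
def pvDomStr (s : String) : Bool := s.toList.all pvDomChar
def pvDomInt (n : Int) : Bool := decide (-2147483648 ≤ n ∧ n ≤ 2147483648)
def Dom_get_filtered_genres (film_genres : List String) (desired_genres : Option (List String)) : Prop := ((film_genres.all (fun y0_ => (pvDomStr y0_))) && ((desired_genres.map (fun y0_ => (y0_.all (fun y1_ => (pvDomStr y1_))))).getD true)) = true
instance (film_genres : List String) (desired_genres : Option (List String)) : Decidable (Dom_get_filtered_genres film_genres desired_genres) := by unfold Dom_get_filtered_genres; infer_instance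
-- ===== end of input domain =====

-- B replaces A's seen-check against the growing output with a shrinking-worklist nub
-- (erase later duplicates of the head from the worklist); objective: alternative.

-- ===== PORT A =====
def get_filtered_genres (film_genres : List String) (desired_genres : Option (List String)) : Option (List String) :=
  match desired_genres with
  | none => none
  | some ds =>
      some (ds.foldl (fun filtered genre =>
        if film_genres.contains genre && !filtered.contains genre then filtered ++ [genre]
        else filtered) [])

-- ===== PORT B =====
-- the while loop of Source B: state = (filtered_genres, rest); each step consumes the head of
-- rest and filters its duplicates out of the remainder
def get_filtered_genres_altLoop (film_genres : List String) (out : List String) : List String → List String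
  | [] => out
  | head :: t =>
      get_filtered_genres_altLoop film_genres
        (if film_genres.contains head then out ++ [head] else out)
        (t.filter (fun g => g ≠ head))
termination_by rest => rest.length
decreasing_by
  simp only [List.length_unattach]
  exact Nat.lt_succ_of_le (by simpa using List.length_filter_le _ t.attach)

def get_filtered_genres_alt (film_genres : List String) (desired_genres : Option (List String)) : Option (List String) :=
  match desired_genres with
  | none => none
  | some ds => some (get_filtered_genres_altLoop film_genres [] ds)

-- ===== PRECONDITION & SPEC =====
def Spec_get_filtered_genres (film_genres : List String) (desired_genres : Option (List String)) (out : Option (List String)) : Prop := out = get_filtered_genres_alt film_genres desired_genres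
instance (film_genres : List String) (desired_genres : Option (List String)) (out : Option (List String)) : Decidable (Spec_get_filtered_genres film_genres desired_genres out) := by unfold Spec_get_filtered_genres; infer_instance

-- ===== CLAIM (what is proved, stated in full; the proofs are below) =====
def Claim_equal_get_filtered_genres : Prop := ∀ (film_genres : List String) (desired_genres : Option (List String)), Dom_get_filtered_genres film_genres desired_genres → Spec_get_filtered_genres film_genres desired_genres (get_filtered_genres film_genres desired_genres)

-- ===== LEMMAS AND PROOFS =====

-- A's step function, spelled out
def stepA (film : List String) (filtered : List String) (genre : String) : List String :=
  if film.contains genre && !filtered.contains genre then filtered ++ [genre] else filtered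

-- if the step skips h (h not in film, or already in acc), then removing all later copies
-- of h from the input does not change A's fold
theorem foldl_stepA_filter_ne (film : List String) (h : String) :
    ∀ (t acc : List String), (film.contains h = false ∨ h ∈ acc) →
    t.foldl (stepA film) acc = (t.filter (fun g => g ≠ h)).foldl (stepA film) acc := by
  intro t
  induction t with
  | nil => intro acc _; rfl
  | cons g t ih =>
    intro acc hskip
    by_cases hg : g = h
    · subst hg
      have hs : stepA film acc g = acc := by
        unfold stepA
        rcases hskip with hf | hm
        · have : g ∉ film := by simpa using hf
          simp
          exact fun h => absurd h this
        · simp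
          exact fun _ => hm
      simp only [List.foldl_cons, List.filter_cons, hs]
      have : (decide (g ≠ g)) = false := by simp
      rw [this]
      exact ih acc hskip
    · have hne : (decide (g ≠ h)) = true := by simp [hg]
      simp only [List.foldl_cons, List.filter_cons, hne, if_pos]
      apply ih
      rcases hskip with hf | hm
      · exact Or.inl hf
      · refine Or.inr ?_
        unfold stepA
        split <;> simp [hm]

-- invariant: while the worklist is disjoint from the accumulator, B's worklist loop
-- computes exactly A's fold
theorem altLoop_eq_foldl (film : List String) :
    ∀ (n : Nat) (ds acc : List String), ds.length ≤ n → (∀ x ∈ acc, x ∉ ds) →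
    get_filtered_genres_altLoop film acc ds = ds.foldl (stepA film) acc := by
  intro n
  induction n with
  | zero =>
    intro ds acc hlen _
    have : ds = [] := List.eq_nil_of_length_eq_zero (Nat.le_zero.mp hlen)
    subst this; rw [get_filtered_genres_altLoop]; rfl
  | succ n ih =>
    intro ds acc hlen hdisj
    match ds with
    | [] => rw [get_filtered_genres_altLoop]; rfl
    | h :: t =>
      have hna : h ∉ acc := fun hm => hdisj h hm (List.mem_cons_self)
      have hstep : stepA film acc h =
          (if film.contains h then acc ++ [h] else acc) := by
        unfold stepA
        by_cases hf : h ∈ film <;> simp [hf, hna]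
      set acc' := (if film.contains h then acc ++ [h] else acc) with hacc'
      have hlen' : (t.filter (fun g => g ≠ h)).length ≤ n :=
        Nat.le_trans (List.length_filter_le _ _) (Nat.le_of_succ_le_succ hlen)
      have hdisj' : ∀ x ∈ acc', x ∉ t.filter (fun g => g ≠ h) := by
        intro x hx hmem
        have hxt : x ∈ t := (List.mem_filter.mp hmem).1
        have hxne : x ≠ h := by
          have := (List.mem_filter.mp hmem).2; simpa using this
        rcases hacc' ▸ hx with hx'
        by_cases hc : film.contains h = true
        · rw [if_pos hc] at hx'
          rcases List.mem_append.mp hx' with hxa | hxh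
          · exact hdisj x hxa (List.mem_cons_of_mem _ hxt)
          · exact hxne (List.mem_singleton.mp hxh)
        · rw [if_neg hc] at hx'
          exact hdisj x hx' (List.mem_cons_of_mem _ hxt)
      have hskip : film.contains h = false ∨ h ∈ acc' := by
        by_cases hc : film.contains h = true
        · exact Or.inr (by rw [hacc', if_pos hc]; simp)
        · exact Or.inl (by simpa using hc)
      calc get_filtered_genres_altLoop film acc (h :: t)
          = get_filtered_genres_altLoop film acc' (t.filter (fun g => g ≠ h)) := by
            rw [hacc', get_filtered_genres_altLoop]
        _ = (t.filter (fun g => g ≠ h)).foldl (stepA film) acc' :=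
            ih _ _ hlen' hdisj'
        _ = t.foldl (stepA film) acc' := (foldl_stepA_filter_ne film h t acc' hskip).symm
        _ = (h :: t).foldl (stepA film) acc := by rw [List.foldl_cons, hstep]

-- ===== VERDICT (by name: the statement is the Claim_ definition above) =====
theorem get_filtered_genres_spec : Claim_equal_get_filtered_genres := by
  intro film_genres desired_genres _
  unfold Spec_get_filtered_genres get_filtered_genres get_filtered_genres_alt
  cases desired_genres with
  | none => rfl
  | some ds =>
    refine congrArg some ?_
    have := altLoop_eq_foldl film_genres ds.length ds [] (Nat.le_refl _) (by intro x hx; cases hx)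
    rw [this]
    rfl
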